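-- pv_equiv track=rewrite | github.com/CodeAlexx/SerenityBoard | serenityboard/server/live_updates.py | _match_tags
-- ===== SOURCE A (Python) =====
-- from fnmatch import fnmatch
--
-- def _match_tags(tags: list[str], patterns: set[str]) -> list[str]:
--     """Return tags that match at least one fnmatch pattern.
--
--     If patterns is empty, all tags are returned (wildcard behavior).
--     """
--     if not patterns:
--         return list(tags)
--     matched: list[str] = []
--     for tag in tags:
--         for pattern in patterns:
--             if fnmatch(tag, pattern):
--                 matched.append(tag)
--                 break
--     return matched
-- ===== SOURCE B (Python) =====
-- # Alternative implementation: each glob pattern is compiled once into a small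
-- # token list (literal / '?' / '*' / character class) and every tag is matched
-- # with a single left-to-right NFA state-set pass -- no regex and no backtracking.
--
-- def _class_token(body):
--     neg = body.startswith('!')
--     if neg:
--         body = body[1:]
--     items = []
--     k, m = 0, len(body)
--     while k < m:
--         if k + 2 < m and body[k + 1] == '-':
--             items.append(('rng', body[k], body[k + 2]))
--             k += 3
--         else:
--             items.append(('one', body[k]))
--             k += 1
--     return ('cls', neg, tuple(items))
--
-- def _tokenize(pat):
--     toks = []
--     i, n = 0, len(pat)
--     while i < n:
--         c = pat[i]; i += 1
--         if c == '*':
--             toks.append(('star',))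
--         elif c == '?':
--             toks.append(('any',))
--         elif c == '[':
--             j = i
--             if j < n and pat[j] == '!':
--                 j += 1
--             if j < n and pat[j] == ']':
--                 j += 1
--             while j < n and pat[j] != ']':
--                 j += 1
--             if j >= n:
--                 toks.append(('lit', '['))
--             else:
--                 toks.append(_class_token(pat[i:j]))
--                 i = j + 1
--         else:
--             toks.append(('lit', c))
--     return toks
--
-- def _tok_match(t, c):
--     if t[0] == 'lit':
--         return c == t[1]
--     if t[0] == 'any':
--         return True
--     if t[0] == 'cls':
--         hit = any((it[0] == 'one' and c == it[1]) or
--                   (it[0] == 'rng' and it[1] <= c <= it[2]) for it in t[2])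
--         return hit != t[1]
--     return False  # 'star' never consumes a char directly
--
-- def _closure(ts, j):
--     out = [j]
--     while j < len(ts) and ts[j] == ('star',):
--         j += 1
--         out.append(j)
--     return out
--
-- def _nfa_match(ts, s):
--     n = len(ts)
--     states = _closure(ts, 0)
--     for c in s:
--         nxt = []
--         for j in states:
--             if j < n:
--                 t = ts[j]
--                 if t == ('star',):
--                     step = _closure(ts, j)
--                 elif _tok_match(t, c):
--                     step = _closure(ts, j + 1)
--                 else:
--                     step = []
--                 for x in step:
--                     if x not in nxt:
--                         nxt.append(x)
--         states = nxt
--     return n in states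
--
-- def _match_tags(tags: list, patterns: set) -> list:
--     """Return tags that match at least one glob pattern (all tags if none)."""
--     if not patterns:
--         return list(tags)
--     compiled = [_tokenize(p) for p in patterns]
--     return [t for t in tags if any(_nfa_match(ts, t) for ts in compiled)]
-- ===== Notes on version B (the rewrite author's own statement) =====
-- stated objective: alternative
-- what changed: Instead of calling fnmatch (regex-based, backtracking) once per tag per pattern, B compiles each glob pattern once into a token list and matches every tag with a single left-to-right NFA state-set pass with no backtracking.
import Mathlib
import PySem

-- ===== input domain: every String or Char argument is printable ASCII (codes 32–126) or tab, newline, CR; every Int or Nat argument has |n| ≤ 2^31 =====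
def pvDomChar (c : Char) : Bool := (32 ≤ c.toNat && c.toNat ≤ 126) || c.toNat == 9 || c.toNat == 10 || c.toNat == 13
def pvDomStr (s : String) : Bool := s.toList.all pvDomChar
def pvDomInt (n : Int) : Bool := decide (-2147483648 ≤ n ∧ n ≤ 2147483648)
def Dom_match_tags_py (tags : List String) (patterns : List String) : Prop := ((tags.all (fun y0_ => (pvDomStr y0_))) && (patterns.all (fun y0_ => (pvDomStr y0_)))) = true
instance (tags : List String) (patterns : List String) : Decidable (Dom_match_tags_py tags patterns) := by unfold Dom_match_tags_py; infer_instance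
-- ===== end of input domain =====

-- B compiles each glob pattern once into a token list and matches every tag with a
-- single NFA state-set pass (no backtracking), instead of A's per-tag-per-pattern
-- fnmatch calls; alternative decomposition, no speed claim.

-- ===== shared glob helpers (bracket scanning, used by both ports) =====

-- scan for the closing ']' of a bracket expression
def findClose : List Char → Option (List Char × List Char)
  | [] => none
  | c :: rest =>
    if c = ']' then some ([], rest)
    else (findClose rest).map (fun br => (c :: br.1, br.2))

-- a leading '!' and a leading ']' belong to the bracket body
def classSplit (cs : List Char) : Option (List Char × List Char) :=
  match cs with
  | '!' :: ']' :: rest => (findClose rest).map (fun br => ('!' :: ']' :: br.1, br.2))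
  | '!' :: rest => (findClose rest).map (fun br => ('!' :: br.1, br.2))
  | ']' :: rest => (findClose rest).map (fun br => (']' :: br.1, br.2))
  | rest => findClose rest

theorem findClose_length (cs : List Char) (br : List Char × List Char)
    (h : findClose cs = some br) : br.2.length < cs.length := by
  induction cs generalizing br with
  | nil => simp [findClose] at h
  | cons c rest ih =>
    simp only [findClose] at h
    split at h
    · cases h; simp
    · cases hfc : findClose rest with
      | none => rw [hfc] at h; simp at h
      | some br' =>
        rw [hfc] at h
        simp only [Option.map_some] at h
        cases h
        have := ih br' hfc
        simpa using Nat.lt_succ_of_lt this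

theorem classSplit_length (cs : List Char) (br : List Char × List Char)
    (h : classSplit cs = some br) : br.2.length < cs.length := by
  unfold classSplit at h
  split at h <;>
    first
      | (cases hfc : findClose _ with
          | none => rw [hfc] at h; simp at h
          | some br' =>
            rw [hfc] at h
            simp only [Option.map_some] at h
            cases h
            have := findClose_length _ _ hfc
            simp at this ⊢
            omega)
      | (have := findClose_length _ _ h; omega)

-- ===== PORT A =====
-- fnmatch(name, pat) ported as the direct recursive glob matcher: the bracket body
-- is interpreted in place (a '-' between two atoms forms a range), '*' backtracks.

def clsIn : List Char → Char → Bool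
  | a :: '-' :: b :: rest, c => (a ≤ c && c ≤ b) || clsIn rest c
  | a :: rest, c => (c == a) || clsIn rest c
  | [], _ => false

def classMatch (body : List Char) (c : Char) : Bool :=
  match body with
  | '!' :: inner => !(clsIn inner c)
  | _ => clsIn body c

def globMatch : List Char → List Char → Bool
  | [], [] => true
  | [], _ :: _ => false
  | '*' :: ps, [] => globMatch ps []
  | '*' :: ps, c :: s => globMatch ps (c :: s) || globMatch ('*' :: ps) s
  | '?' :: _, [] => false
  | '?' :: ps, _ :: s => globMatch ps s
  | '[' :: _, [] => false
  | '[' :: rest, c :: s =>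
    match classSplit rest with
    | some br => classMatch br.1 c && globMatch br.2 s
    | none => (c == '[') && globMatch rest s
  | _ :: _, [] => false
  | p :: ps, c :: s => (c == p) && globMatch ps s
termination_by p s => (s.length, p.length)

def fnmatchPort (name pat : String) : Bool :=
  globMatch pat.toList name.toList

-- inner 'for pattern in patterns: if fnmatch: append; break'
def scanPatterns (tag : String) (ps : List String) (matched : List String) : List String :=
  match ps with
  | [] => matched
  | p :: rest => if fnmatchPort tag p then matched ++ [tag] else scanPatterns tag rest matched

def match_tags_py (tags : List String) (patterns : List String) : List String :=
  if patterns.isEmpty then tags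
  else tags.foldl (fun matched tag => scanPatterns tag patterns matched) []

-- ===== PORT B =====
-- compile each pattern to tokens once, then one NFA state-set pass per tag

inductive GItem where
  | one : Char → GItem
  | rng : Char → Char → GItem
deriving DecidableEq, Repr

inductive GTok where
  | lit : Char → GTok
  | any : GTok
  | star : GTok
  | cls : Bool → List GItem → GTok
deriving DecidableEq, Repr

def parseItems : List Char → List GItem
  | a :: '-' :: b :: rest => GItem.rng a b :: parseItems rest
  | a :: rest => GItem.one a :: parseItems rest
  | [] => []

def classToken (body : List Char) : GTok :=
  match body with
  | '!' :: inner => GTok.cls true (parseItems inner)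
  | _ => GTok.cls false (parseItems body)

def tokenize : List Char → List GTok
  | [] => []
  | '*' :: rest => GTok.star :: tokenize rest
  | '?' :: rest => GTok.any :: tokenize rest
  | '[' :: rest =>
    match h : classSplit rest with
    | none => GTok.lit '[' :: tokenize rest
    | some br => classToken br.1 :: tokenize br.2
  | c :: rest => GTok.lit c :: tokenize rest
termination_by cs => cs.length
decreasing_by
  all_goals simp
  have := classSplit_length rest _ h
  omega

def itemMatch (c : Char) : GItem → Bool
  | GItem.one a => c == a
  | GItem.rng a b => a ≤ c && c ≤ b

def tokMatch (t : GTok) (c : Char) : Bool :=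
  match t with
  | GTok.lit a => c == a
  | GTok.any => true
  | GTok.star => false
  | GTok.cls neg items => (items.any (itemMatch c)) != neg

-- epsilon closure: from position j skip any run of '*'
def closFrom (ts : List GTok) (j : Nat) : List Nat :=
  if h : j < ts.length then
    if ts[j] = GTok.star then j :: closFrom ts (j + 1) else [j]
  else [j]
termination_by ts.length - j

-- consuming one char from state j
def stepState (ts : List GTok) (c : Char) (j : Nat) : List Nat :=
  if h : j < ts.length then
    if ts[j] = GTok.star then closFrom ts j
    else if tokMatch ts[j] c then closFrom ts (j + 1) else []
  else []

def nfaStep (ts : List GTok) (S : List Nat) (c : Char) : List Nat :=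
  PySem.List.dedup (S.flatMap (stepState ts c))

def nfaMatch (ts : List GTok) (s : List Char) : Bool :=
  (s.foldl (nfaStep ts) (closFrom ts 0)).contains ts.length

def match_tags_py_alt (tags : List String) (patterns : List String) : List String :=
  if patterns.isEmpty then tags
  else
    let compiled := patterns.map (fun p => tokenize p.toList)
    tags.filter (fun t => compiled.any (fun ts => nfaMatch ts t.toList))

-- ===== PRECONDITION & SPEC =====
def Spec_match_tags_py (tags : List String) (patterns : List String) (out : List String) : Prop := out = match_tags_py_alt tags patterns
instance (tags : List String) (patterns : List String) (out : List String) : Decidable (Spec_match_tags_py tags patterns out) := by unfold Spec_match_tags_py; infer_instance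

-- ===== CLAIM =====
def Claim_equal_match_tags_py : Prop := ∀ (tags : List String) (patterns : List String), Dom_match_tags_py tags patterns → Spec_match_tags_py tags patterns (match_tags_py tags patterns)

-- ===== LEMMAS AND PROOFS =====

-- reference backtracking matcher over token lists (proof-only middle ground)
def matchFrom : List GTok → List Char → Bool
  | [], [] => true
  | [], _ :: _ => false
  | GTok.star :: ts, [] => matchFrom ts []
  | GTok.star :: ts, c :: s' => matchFrom ts (c :: s') || matchFrom (GTok.star :: ts) s'
  | _ :: _, [] => false
  | t :: ts, c :: s' => tokMatch t c && matchFrom ts s'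
termination_by ts s => (s.length, ts.length)

theorem clsIn_eq (body : List Char) (c : Char) :
    (parseItems body).any (itemMatch c) = clsIn body c := by
  induction body using parseItems.induct with
  | case1 a b rest ih => simp [parseItems, clsIn, itemMatch, ih]
  | case2 a rest hne ih =>
    have h1 : parseItems (a :: rest) = GItem.one a :: parseItems rest := by
      rw [parseItems.eq_def]
      split
      · rename_i a' b' rest' heq
        injection heq with _ h; exact absurd h (by intro hh; exact hne b' rest' hh)
      · rename_i heq; injection heq with h1 h2; rw [h1, h2]
      · rename_i heq; simp at heq
    have h2 : clsIn (a :: rest) c = ((c == a) || clsIn rest c) := by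
      rw [clsIn.eq_def]
      split
      · rename_i a' b' rest' heq
        injection heq with _ h; exact absurd h (by intro hh; exact hne b' rest' hh)
      · rename_i heq; injection heq with h1 h2; rw [h1, h2]
      · rename_i heq; simp at heq
    simp [h1, h2, itemMatch, ih]
  | case3 => simp [parseItems, clsIn]

theorem classToken_eq (body : List Char) (c : Char) :
    tokMatch (classToken body) c = classMatch body c := by
  rw [classToken.eq_def, classMatch.eq_def]
  split
  · simp [tokMatch, clsIn_eq]
  · simp [tokMatch, clsIn_eq]

theorem matchFrom_cons (t : GTok) (ts : List GTok) (c : Char) (s : List Char)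
    (h : t ≠ GTok.star) : matchFrom (t :: ts) (c :: s) = (tokMatch t c && matchFrom ts s) := by
  rw [matchFrom.eq_def]; split <;> simp_all

theorem matchFrom_nil_cons (t : GTok) (ts : List GTok) (h : t ≠ GTok.star) :
    matchFrom (t :: ts) [] = false := by
  rw [matchFrom.eq_def]; split <;> simp_all

theorem classToken_ne_star (body : List Char) : classToken body ≠ GTok.star := by
  rw [classToken.eq_def]; split <;> simp

theorem tokenize_bracket (rest : List Char) :
    tokenize ('[' :: rest) = match classSplit rest with
      | none => GTok.lit '[' :: tokenize rest
      | some br => classToken br.1 :: tokenize br.2 := by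
  rw [tokenize.eq_def]
  split
  · rename_i heq; simp at heq
  · rename_i heq; simp at heq
  · rename_i heq; simp at heq
  · rename_i heq; injection heq with _ h; subst h; split <;> simp_all
  · rename_i heq; injection heq with h1 h2; subst h1; simp_all

theorem globMatch_bracket (rest : List Char) (c : Char) (s : List Char) :
    globMatch ('[' :: rest) (c :: s) = match classSplit rest with
      | some br => classMatch br.1 c && globMatch br.2 s
      | none => ((c == '[') && globMatch rest s) := by
  rw [globMatch.eq_def]
  split <;> try simp_all
  rename_i heq1 heq2
  exact absurd heq1.1.symm (by assumption)

theorem tokenize_lit (p : Char) (ps : List Char) (h1 : p ≠ '*') (h2 : p ≠ '?') (h3 : p ≠ '[') :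
    tokenize (p :: ps) = GTok.lit p :: tokenize ps := by
  rw [tokenize.eq_def]; split <;> simp_all

theorem globMatch_nil_cons (p : Char) (ps : List Char) (h : p ≠ '*') :
    globMatch (p :: ps) [] = false := by
  rw [globMatch.eq_def]; split <;> simp_all

theorem globMatch_lit (p : Char) (ps : List Char) (c : Char) (s : List Char)
    (h1 : p ≠ '*') (h2 : p ≠ '?') (h3 : p ≠ '[') :
    globMatch (p :: ps) (c :: s) = ((c == p) && globMatch ps s) := by
  rw [globMatch.eq_def]; split <;> simp_all

theorem glob_eq (p s : List Char) : matchFrom (tokenize p) s = globMatch p s := by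
  induction p, s using globMatch.induct with
  | case1 => simp [tokenize, matchFrom, globMatch]
  | case2 => simp [tokenize, matchFrom, globMatch]
  | case3 ps ih => simp only [tokenize, matchFrom, globMatch]; exact ih
  | case4 ps c s ih1 ih2 =>
    simp only [tokenize] at ih2 ⊢
    simp only [matchFrom, globMatch, ih1, ih2]
  | case5 ps => simp [tokenize, matchFrom, globMatch]
  | case6 ps c s ih => simp [tokenize, matchFrom, globMatch, tokMatch, ih]
  | case7 tail =>
    have hg : globMatch ('[' :: tail) [] = false := by rw [globMatch.eq_def]; simp
    rw [hg, tokenize_bracket]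
    cases hcs : classSplit tail with
    | none => simp [matchFrom_nil_cons]
    | some br => simp [matchFrom_nil_cons _ _ (classToken_ne_star br.1)]
  | case8 rest c s br heq ih =>
    rw [tokenize_bracket, globMatch_bracket]
    simp only [heq]
    rw [matchFrom_cons _ _ _ _ (classToken_ne_star br.1), classToken_eq, ih]
  | case9 rest c s heq ih =>
    rw [tokenize_bracket, globMatch_bracket]
    simp only [heq]
    rw [matchFrom_cons _ _ _ _ (by simp), ih]
    simp [tokMatch]
  | case10 head tail h1 h2 h3 =>
    rw [tokenize_lit head tail (by intro x; exact h1 x) (by intro x; exact h2 x) (by intro x; exact h3 x)]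
    rw [globMatch_nil_cons head tail (by intro x; exact h1 x)]
    exact matchFrom_nil_cons _ _ (by simp)
  | case11 p ps c s h1 h2 h3 ih =>
    rw [tokenize_lit p ps (by intro x; exact h1 x) (by intro x; exact h2 x) (by intro x; exact h3 x)]
    rw [matchFrom_cons _ _ _ _ (by simp), ih,
      globMatch_lit p ps c s (by intro x; exact h1 x) (by intro x; exact h2 x) (by intro x; exact h3 x)]
    simp [tokMatch]

-- ===== the NFA state-set pass computes matchFrom =====

theorem closFrom_self (ts : List GTok) (j : Nat) : j ∈ closFrom ts j := by
  rw [closFrom]; split_ifs <;> simp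

theorem closFrom_le (ts : List GTok) :
    ∀ m j, ts.length - j = m → j ≤ ts.length → ∀ k ∈ closFrom ts j, k ≤ ts.length := by
  intro m
  induction m with
  | zero =>
    intro j hm hj k hk
    have hj' : ¬ j < ts.length := by omega
    rw [closFrom] at hk
    simp [hj'] at hk
    omega
  | succ n ih =>
    intro j hm hj k hk
    have hj' : j < ts.length := by omega
    rw [closFrom] at hk
    rw [dif_pos hj'] at hk
    split_ifs at hk with hstar
    · rcases List.mem_cons.mp hk with h | h
      · omega
      · exact ih (j + 1) (by omega) (by omega) k h
    · simp at hk; omega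

theorem closFrom_closed (ts : List GTok) :
    ∀ m j, ts.length - j = m → ∀ k ∈ closFrom ts j, ∀ k' ∈ closFrom ts k, k' ∈ closFrom ts j := by
  intro m
  induction m with
  | zero =>
    intro j hm k hk k' hk'
    by_cases hj' : j < ts.length
    · omega
    · rw [closFrom] at hk; simp [hj'] at hk; subst hk; exact hk'
  | succ n ih =>
    intro j hm k hk k' hk'
    by_cases hj' : j < ts.length
    · rw [closFrom] at hk
      rw [dif_pos hj'] at hk
      by_cases hstar : ts[j] = GTok.star
      · rw [if_pos hstar] at hk
        rcases List.mem_cons.mp hk with h | h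
        · subst h; exact hk'
        · have := ih (j + 1) (by omega) k h k' hk'
          rw [closFrom, dif_pos hj', if_pos hstar]
          exact List.mem_cons_of_mem _ this
      · rw [if_neg hstar] at hk; simp at hk; subst hk; exact hk'
    · rw [closFrom] at hk; simp [hj'] at hk; subst hk; exact hk'

theorem P_close (ts : List GTok) (s : List Char) :
    ∀ m j, ts.length - j = m → ∀ k ∈ closFrom ts j,
      matchFrom (ts.drop k) s = true → matchFrom (ts.drop j) s = true := by
  intro m
  induction m with
  | zero =>
    intro j hm k hk hP
    by_cases hj' : j < ts.length
    · omega
    · rw [closFrom] at hk; simp [hj'] at hk; subst hk; exact hP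
  | succ n ih =>
    intro j hm k hk hP
    have hj' : j < ts.length := by omega
    rw [closFrom, dif_pos hj'] at hk
    by_cases hstar : ts[j] = GTok.star
    · rw [if_pos hstar] at hk
      rcases List.mem_cons.mp hk with h | h
      · subst h; exact hP
      · have h1 := ih (j + 1) (by omega) k h hP
        rw [List.drop_eq_getElem_cons hj', hstar]
        cases s with
        | nil => simpa [matchFrom] using h1
        | cons c s' => simp only [matchFrom, Bool.or_eq_true]; exact Or.inl h1
    · rw [if_neg hstar] at hk; simp at hk; subst hk; exact hP

theorem P_nil (ts : List GTok) :
    ∀ m j, ts.length - j = m → j ≤ ts.length →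
      matchFrom (ts.drop j) [] = true → ts.length ∈ closFrom ts j := by
  intro m
  induction m with
  | zero =>
    intro j hm hj hP
    have : j = ts.length := by omega
    subst this
    rw [closFrom]
    simp
  | succ n ih =>
    intro j hm hj hP
    have hj' : j < ts.length := by omega
    rw [List.drop_eq_getElem_cons hj'] at hP
    obtain ⟨t, ht⟩ : ∃ t, ts[j] = t := ⟨_, rfl⟩
    rw [ht] at hP
    rw [closFrom, dif_pos hj', ht]
    cases t with
    | star =>
      rw [if_pos rfl]
      simp only [matchFrom] at hP
      exact List.mem_cons_of_mem _ (ih (j + 1) (by omega) (by omega) hP)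
    | lit a => simp [matchFrom] at hP
    | any => simp [matchFrom] at hP
    | cls neg items => simp [matchFrom] at hP

theorem stepF (ts : List GTok) (c : Char) (s : List Char) :
    ∀ m j, ts.length - j = m → j ≤ ts.length →
      matchFrom (ts.drop j) (c :: s) = true →
      ∃ k ∈ closFrom ts j, ∃ j' ∈ stepState ts c k, matchFrom (ts.drop j') s = true := by
  intro m
  induction m with
  | zero =>
    intro j hm hj hP
    have : j = ts.length := by omega
    subst this
    rw [List.drop_length] at hP
    simp [matchFrom] at hP
  | succ n ih =>
    intro j hm hj hP
    have hj' : j < ts.length := by omega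
    rw [List.drop_eq_getElem_cons hj'] at hP
    obtain ⟨t, ht⟩ : ∃ t, ts[j] = t := ⟨_, rfl⟩
    rw [ht] at hP
    cases t with
    | star =>
      simp only [matchFrom, Bool.or_eq_true] at hP
      rcases hP with h | h
      · obtain ⟨k, hk, j', hj'2, hPj'⟩ := ih (j + 1) (by omega) (by omega) h
        refine ⟨k, ?_, j', hj'2, hPj'⟩
        rw [closFrom, dif_pos hj', ht, if_pos rfl]
        exact List.mem_cons_of_mem _ hk
      · refine ⟨j, closFrom_self ts j, j, ?_, ?_⟩
        · rw [stepState, dif_pos hj', ht, if_pos rfl]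
          exact closFrom_self ts j
        · rw [List.drop_eq_getElem_cons hj', ht]
          exact h
    | lit a =>
      simp only [matchFrom, Bool.and_eq_true] at hP
      refine ⟨j, closFrom_self ts j, j + 1, ?_, hP.2⟩
      rw [stepState, dif_pos hj', ht, if_neg (by simp), if_pos hP.1]
      exact closFrom_self ts (j + 1)
    | any =>
      simp only [matchFrom, Bool.and_eq_true] at hP
      refine ⟨j, closFrom_self ts j, j + 1, ?_, hP.2⟩
      rw [stepState, dif_pos hj', ht, if_neg (by simp), if_pos hP.1]
      exact closFrom_self ts (j + 1)
    | cls neg items =>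
      simp only [matchFrom, Bool.and_eq_true] at hP
      refine ⟨j, closFrom_self ts j, j + 1, ?_, hP.2⟩
      rw [stepState, dif_pos hj', ht, if_neg (by simp), if_pos hP.1]
      exact closFrom_self ts (j + 1)

theorem stepB (ts : List GTok) (c : Char) (s : List Char) (k j' : Nat)
    (hj' : j' ∈ stepState ts c k) (hP : matchFrom (ts.drop j') s = true) :
    matchFrom (ts.drop k) (c :: s) = true := by
  rw [stepState] at hj'
  by_cases hk : k < ts.length
  · rw [dif_pos hk] at hj'
    obtain ⟨t, ht⟩ : ∃ t, ts[k] = t := ⟨_, rfl⟩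
    rw [ht] at hj'
    rw [List.drop_eq_getElem_cons hk, ht]
    cases t with
    | star =>
      rw [if_pos rfl] at hj'
      have h1 : matchFrom (ts.drop k) s = true := P_close ts s _ k rfl j' hj' hP
      rw [List.drop_eq_getElem_cons hk, ht] at h1
      simp only [matchFrom, Bool.or_eq_true]
      exact Or.inr h1
    | lit a =>
      rw [if_neg (by simp)] at hj'
      split_ifs at hj' with htm
      · have h1 := P_close ts s _ (k + 1) rfl j' hj' hP
        simp only [matchFrom, Bool.and_eq_true]
        exact ⟨htm, h1⟩
      · simp at hj'
    | any =>
      rw [if_neg (by simp)] at hj'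
      split_ifs at hj' with htm
      · have h1 := P_close ts s _ (k + 1) rfl j' hj' hP
        simp only [matchFrom, Bool.and_eq_true]
        exact ⟨htm, h1⟩
      · simp at hj'
    | cls neg items =>
      rw [if_neg (by simp)] at hj'
      split_ifs at hj' with htm
      · have h1 := P_close ts s _ (k + 1) rfl j' hj' hP
        simp only [matchFrom, Bool.and_eq_true]
        exact ⟨htm, h1⟩
      · simp at hj'
  · rw [dif_neg hk] at hj'
    simp at hj'

theorem mem_nfaStep (ts : List GTok) (c : Char) (S : List Nat) (j' : Nat) :
    j' ∈ nfaStep ts S c ↔ ∃ k ∈ S, j' ∈ stepState ts c k := by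
  simp [nfaStep, List.mem_flatMap]

theorem stepState_le (ts : List GTok) (c : Char) (k j' : Nat)
    (h : j' ∈ stepState ts c k) : j' ≤ ts.length := by
  rw [stepState] at h
  by_cases hk : k < ts.length
  · rw [dif_pos hk] at h
    split_ifs at h with h1 h2
    · exact closFrom_le ts _ k rfl (by omega) j' h
    · exact closFrom_le ts _ (k + 1) rfl (by omega) j' h
    · simp at h
  · rw [dif_neg hk] at h; simp at h

theorem stepState_closed (ts : List GTok) (c : Char) (k j' : Nat)
    (h : j' ∈ stepState ts c k) : ∀ k' ∈ closFrom ts j', k' ∈ stepState ts c k := by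
  intro k' hk'
  rw [stepState] at h ⊢
  by_cases hk : k < ts.length
  · rw [dif_pos hk] at h ⊢
    split_ifs at h ⊢ with h1 h2
    · exact closFrom_closed ts _ k rfl j' h k' hk'
    · exact closFrom_closed ts _ (k + 1) rfl j' h k' hk'
    · simp at h
  · rw [dif_neg hk] at h; simp at h

theorem run_spec (ts : List GTok) (s : List Char) :
    ∀ S : List Nat, (∀ j ∈ S, j ≤ ts.length) →
      (∀ j ∈ S, ∀ k ∈ closFrom ts j, k ∈ S) →
      ((s.foldl (nfaStep ts) S).contains ts.length = true ↔
        ∃ j ∈ S, matchFrom (ts.drop j) s = true) := by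
  induction s with
  | nil =>
    intro S hb hc
    simp only [List.foldl_nil]
    constructor
    · intro h
      have hn : ts.length ∈ S := by simpa using h
      exact ⟨ts.length, hn, by rw [List.drop_length]; simp [matchFrom]⟩
    · rintro ⟨j, hj, hP⟩
      have h1 := P_nil ts _ j rfl (hb j hj) hP
      have h2 : ts.length ∈ S := hc j hj _ h1
      simpa using h2
  | cons c s' ih =>
    intro S hb hc
    rw [List.foldl_cons]
    have hb' : ∀ j' ∈ nfaStep ts S c, j' ≤ ts.length := by
      intro j' hj'
      obtain ⟨k, hkS, hks⟩ := (mem_nfaStep ts c S j').mp hj'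
      exact stepState_le ts c k j' hks
    have hc' : ∀ j' ∈ nfaStep ts S c, ∀ k' ∈ closFrom ts j', k' ∈ nfaStep ts S c := by
      intro j' hj' k' hk'
      obtain ⟨k, hkS, hks⟩ := (mem_nfaStep ts c S j').mp hj'
      exact (mem_nfaStep ts c S k').mpr ⟨k, hkS, stepState_closed ts c k j' hks k' hk'⟩
    rw [ih (nfaStep ts S c) hb' hc']
    constructor
    · rintro ⟨j', hj', hP⟩
      obtain ⟨k, hkS, hks⟩ := (mem_nfaStep ts c S j').mp hj'
      exact ⟨k, hkS, stepB ts c s' k j' hks hP⟩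
    · rintro ⟨j, hj, hP⟩
      obtain ⟨k, hk, j', hj'2, hPj'⟩ := stepF ts c s' _ j rfl (hb j hj) hP
      exact ⟨j', (mem_nfaStep ts c S j').mpr ⟨k, hc j hj k hk, hj'2⟩, hPj'⟩

theorem nfa_correct (ts : List GTok) (s : List Char) :
    nfaMatch ts s = matchFrom ts s := by
  have hb : ∀ j ∈ closFrom ts 0, j ≤ ts.length := closFrom_le ts _ 0 rfl (Nat.zero_le _)
  have hc : ∀ j ∈ closFrom ts 0, ∀ k ∈ closFrom ts j, k ∈ closFrom ts 0 := closFrom_closed ts _ 0 rfl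
  have h := run_spec ts s (closFrom ts 0) hb hc
  have h2 : (∃ j ∈ closFrom ts 0, matchFrom (ts.drop j) s = true) ↔ matchFrom ts s = true := by
    constructor
    · rintro ⟨j, hj, hP⟩
      have h1 := P_close ts s _ 0 rfl j hj hP
      simpa using h1
    · intro hP
      exact ⟨0, closFrom_self ts 0, by simpa using hP⟩
  rw [nfaMatch]
  rcases Bool.eq_false_or_eq_true (matchFrom ts s) with hm | hm <;>
    rcases Bool.eq_false_or_eq_true ((s.foldl (nfaStep ts) (closFrom ts 0)).contains ts.length) with hn | hn <;>
      simp_all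

theorem scan_eq (tag : String) (ps : List String) (m : List String) :
    scanPatterns tag ps m = if ps.any (fun p => fnmatchPort tag p) then m ++ [tag] else m := by
  induction ps with
  | nil => simp [scanPatterns]
  | cons p rest ih =>
    simp only [scanPatterns, List.any_cons]
    rcases Bool.eq_false_or_eq_true (fnmatchPort tag p) with h | h <;> simp [h, ih]

-- ===== VERDICT =====
theorem match_tags_py_spec : Claim_equal_match_tags_py := by
  intro tags patterns _
  unfold Spec_match_tags_py match_tags_py match_tags_py_alt
  by_cases hp : patterns.isEmpty
  · simp [hp]
  · simp only [hp, if_false, Bool.false_eq_true]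
    have hfun : (fun (matched : List String) (tag : String) => scanPatterns tag patterns matched)
        = fun matched tag => if patterns.any (fun p => fnmatchPort tag p) then matched ++ [tag] else matched := by
      funext m t
      exact scan_eq t patterns m
    rw [hfun, PySem.List.foldl_append_if_eq_filter]
    simp [List.any_map, Function.comp_def, fnmatchPort, nfa_correct, glob_eq]
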